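-- pv_equiv track=rewrite | github.com/vergnetp/shared_libs | backend/app_kernel/webhooks/stores.py | _event_matches
-- ===== SOURCE A (Python) =====
-- from typing import Optional, Dict, Any, List
--
-- def _event_matches(event: str, subscribed_events: List[str]) -> bool:
--     """Check if event matches any subscribed pattern."""
--     for pattern in subscribed_events:
--         if pattern == "*":
--             return True
--         if pattern == event:
--             return True
--         if pattern.endswith(".*"):
--             prefix = pattern[:-2]
--             if event.startswith(prefix + "."):
--                 return True
--     return False
-- ===== SOURCE B (Python) =====
-- def _event_matches(event, subscribed_events):
--     """Check if event matches any subscribed pattern."""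
--     # Derive from the event the complete set of patterns that could match it,
--     # then intersect with the subscription list.
--     candidates = {"*", event}
--     for i, ch in enumerate(event):
--         if ch == ".":
--             candidates.add(event[:i] + ".*")
--     return not candidates.isdisjoint(subscribed_events)
-- ===== Notes on version B (the rewrite author's own statement) =====
-- stated objective: alternative
-- what changed: Instead of testing every subscribed pattern against the event (wildcard/exact/prefix tests per pattern), B enumerates the event once to build the complete candidate set of patterns that could match it ('*', the event, and event[:i]+'.*' for each dot position) and returns whether that set intersects the subscription list.
import Mathlib
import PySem

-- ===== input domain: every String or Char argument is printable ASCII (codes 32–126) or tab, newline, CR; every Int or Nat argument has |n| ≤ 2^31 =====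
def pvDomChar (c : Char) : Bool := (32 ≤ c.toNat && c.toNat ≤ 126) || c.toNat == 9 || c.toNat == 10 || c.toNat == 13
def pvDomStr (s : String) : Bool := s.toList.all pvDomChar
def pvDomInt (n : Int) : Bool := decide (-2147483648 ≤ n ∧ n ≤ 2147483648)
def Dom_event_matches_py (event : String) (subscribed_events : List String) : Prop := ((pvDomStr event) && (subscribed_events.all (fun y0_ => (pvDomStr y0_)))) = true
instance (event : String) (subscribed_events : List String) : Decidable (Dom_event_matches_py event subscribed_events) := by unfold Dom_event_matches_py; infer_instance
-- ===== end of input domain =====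

-- B inverts the algorithm: instead of testing each subscribed pattern against the event,
-- it enumerates the event once to build the finite candidate set of patterns that could
-- match it and intersects that set with the subscription list; objective: alternative.

-- ===== PORT A =====
-- A's for-loop with early returns, as structural recursion over the pattern list.
def pvGoA (event : String) : List String → Bool
  | [] => false
  | p :: rest =>
    if p = "*" then true
    else if p = event then true
    else if PySem.Chars.endswith p.toList ['.', '*'] then
      let pre := PySem.List.slice p.toList none (some (-2))
      if PySem.Chars.startswith event.toList (pre ++ ['.']) then true
      else pvGoA event rest
    else pvGoA event rest

def event_matches_py (event : String) (subscribed_events : List String) : Bool :=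
  pvGoA event subscribed_events

-- ===== PORT B =====
-- candidates = {"*", event}; for i, ch in enumerate(event): if ch == ".": candidates.add(event[:i] + ".*")
-- return not candidates.isdisjoint(subscribed_events)
def event_matches_py_alt (event : String) (subscribed_events : List String) : Bool :=
  let candidates :=
    (PySem.List.enumerate event.toList 0).foldl
      (fun s p =>
        if p.2 = '.' then
          PySem.Set.add s (String.ofList (PySem.List.slice event.toList none (some p.1) ++ ['.', '*']))
        else s)
      (PySem.Set.ofList ["*", event])
  !(PySem.Set.isdisjoint candidates subscribed_events)

-- ===== PRECONDITION & SPEC =====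
def Spec_event_matches_py (event : String) (subscribed_events : List String) (out : Bool) : Prop := out = event_matches_py_alt event subscribed_events
instance (event : String) (subscribed_events : List String) (out : Bool) : Decidable (Spec_event_matches_py event subscribed_events out) := by unfold Spec_event_matches_py; infer_instance

-- ===== CLAIM (what is proved, stated in full; the proofs are below) =====
def Claim_equal_event_matches_py : Prop := ∀ (event : String) (subscribed_events : List String), Dom_event_matches_py event subscribed_events → Spec_event_matches_py event subscribed_events (event_matches_py event subscribed_events)

-- ===== LEMMAS AND PROOFS =====

-- a pattern p matches event (in A's sense / as a B candidate)
def pvMatch (event p : String) : Prop :=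
  p = "*" ∨ p = event ∨
    ∃ (k : Nat), ∃ _ : k < event.toList.length,
      event.toList[k] = '.' ∧ p = String.ofList (event.toList.take k ++ ['.', '*'])

-- A's per-pattern triple test is exactly pvMatch.
theorem pv_testA_iff (event p : String) :
    (p = "*" ∨ p = event ∨
      (PySem.Chars.endswith p.toList ['.', '*'] = true ∧
       PySem.Chars.startswith event.toList
         (PySem.List.slice p.toList none (some (-2)) ++ ['.']) = true)) ↔ pvMatch event p := by
  unfold pvMatch
  refine or_congr Iff.rfl (or_congr Iff.rfl ?_)
  constructor
  · rintro ⟨he, hs⟩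
    rw [PySem.Chars.endswith_iff] at he
    obtain ⟨q, hq⟩ := he
    rw [PySem.Chars.startswith_iff] at hs
    have hslice : PySem.List.slice p.toList none (some (-2)) = q := by
      rw [PySem.List.slice_to_neg_ofNat _ 2 (by omega), ← hq]
      simp
    rw [hslice] at hs
    obtain ⟨u, hu⟩ := hs
    have hk' : q.length < event.toList.length := by rw [← hu]; simp
    refine ⟨q.length, hk', ?_, ?_⟩
    · have h9 : event.toList[q.length]? = some '.' := by
        rw [← hu, List.getElem?_append_left (by simp),
          List.getElem?_append_right (le_refl _)]
        simp
      rw [List.getElem?_eq_getElem hk'] at h9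
      exact Option.some.inj h9
    · have h2 : event.toList.take q.length = q := by
        rw [← hu]; simp
      rw [h2, hq]
      exact String.ofList_toList.symm
  · rintro ⟨k, hk, hdot, hp⟩
    have hpl : p.toList = event.toList.take k ++ ['.', '*'] := by
      rw [hp]; simp
    constructor
    · rw [PySem.Chars.endswith_iff, hpl]
      exact ⟨_, rfl⟩
    · rw [PySem.Chars.startswith_iff]
      have hslice : PySem.List.slice p.toList none (some (-2)) = event.toList.take k := by
        rw [hpl, PySem.List.slice_to_neg_ofNat _ 2 (by omega)]
        simp [List.length_take]
      rw [hslice]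
      refine ⟨event.toList.drop (k + 1), ?_⟩
      rw [List.append_assoc]
      simp only [List.singleton_append]
      rw [← hdot, List.getElem_cons_drop, List.take_append_drop]

-- A's early-return loop returns true iff some pattern matches.
theorem pvGoA_iff (event : String) (subs : List String) :
    pvGoA event subs = true ↔ ∃ p ∈ subs, pvMatch event p := by
  induction subs with
  | nil => simp [pvGoA]
  | cons p rest ih =>
    constructor
    · intro h
      unfold pvGoA at h
      dsimp only at h
      split_ifs at h with h1 h2 h3 h4
      · exact ⟨p, by simp, (pv_testA_iff event p).mp (Or.inl h1)⟩
      · exact ⟨p, by simp, (pv_testA_iff event p).mp (Or.inr (Or.inl h2))⟩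
      · exact ⟨p, by simp, (pv_testA_iff event p).mp (Or.inr (Or.inr ⟨h3, h4⟩))⟩
      · obtain ⟨q, hq, hm⟩ := ih.mp h
        exact ⟨q, by simp [hq], hm⟩
      · obtain ⟨q, hq, hm⟩ := ih.mp h
        exact ⟨q, by simp [hq], hm⟩
    · rintro ⟨q, hq, hm⟩
      rcases List.mem_cons.mp hq with rfl | hq'
      · rcases (pv_testA_iff event q).mpr hm with h1 | h2 | ⟨h3, h4⟩
        · simp [pvGoA, h1]
        · simp [pvGoA, h2]
        · unfold pvGoA; dsimp only; split_ifs <;> simp_all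
      · have := ih.mpr ⟨q, hq', hm⟩
        unfold pvGoA; dsimp only; split_ifs <;> simp_all

-- membership in B's candidate fold, for an arbitrary accumulator
theorem pv_mem_fold (event : String) (l : List (Int × Char)) (s : PySem.Set String) (x : String) :
    x ∈ l.foldl
      (fun s p =>
        if p.2 = '.' then
          PySem.Set.add s (String.ofList (PySem.List.slice event.toList none (some p.1) ++ ['.', '*']))
        else s) s ↔
    x ∈ s ∨ ∃ p ∈ l, p.2 = '.' ∧
      x = String.ofList (PySem.List.slice event.toList none (some p.1) ++ ['.', '*']) := by
  induction l generalizing s with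
  | nil => simp
  | cons a l ih =>
    simp only [List.foldl_cons, ih]
    by_cases h : a.2 = '.'
    · rw [if_pos h]
      simp only [PySem.Set.mem_add, List.mem_cons]
      constructor
      · rintro ((hx | rfl) | ⟨p, hp, hd, hx⟩)
        · exact Or.inl hx
        · exact Or.inr ⟨a, Or.inl rfl, h, rfl⟩
        · exact Or.inr ⟨p, Or.inr hp, hd, hx⟩
      · rintro (hx | ⟨p, (rfl | hp), hd, hx⟩)
        · exact Or.inl (Or.inl hx)
        · exact Or.inl (Or.inr hx)
        · exact Or.inr ⟨p, hp, hd, hx⟩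
    · rw [if_neg h]
      simp only [List.mem_cons]
      constructor
      · rintro (hx | ⟨p, hp, hd, hx⟩)
        · exact Or.inl hx
        · exact Or.inr ⟨p, Or.inr hp, hd, hx⟩
      · rintro (hx | ⟨p, (rfl | hp), hd, hx⟩)
        · exact Or.inl hx
        · exact absurd hd h
        · exact Or.inr ⟨p, hp, hd, hx⟩

-- B's candidate set contains exactly the patterns that match event.
theorem pv_mem_cands (event x : String) :
    x ∈ (PySem.List.enumerate event.toList 0).foldl
      (fun s p =>
        if p.2 = '.' then
          PySem.Set.add s (String.ofList (PySem.List.slice event.toList none (some p.1) ++ ['.', '*']))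
        else s)
      (PySem.Set.ofList ["*", event]) ↔ pvMatch event x := by
  rw [pv_mem_fold]
  unfold pvMatch
  simp only [PySem.Set.mem_ofList, List.mem_cons]
  constructor
  · rintro (h | ⟨p, hp, hdot, hx⟩)
    · tauto
    · right; right
      rw [PySem.List.mem_enumerate_iff] at hp
      obtain ⟨k, hk, rfl⟩ := hp
      refine ⟨k, hk, hdot, ?_⟩
      rw [hx]
      have : ((0 : Int) + (k : Int)) = ((k : Nat) : Int) := by omega
      rw [this, PySem.List.slice_to_natCast]
  · rintro (h | h | ⟨k, hk, hdot, hx⟩)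
    · tauto
    · tauto
    · right
      refine ⟨((0 : Int) + (k : Int), event.toList[k]), ?_, hdot, ?_⟩
      · rw [PySem.List.mem_enumerate_iff]; exact ⟨k, hk, rfl⟩
      · rw [hx]
        have : ((0 : Int) + (k : Int)) = ((k : Nat) : Int) := by omega
        rw [this, PySem.List.slice_to_natCast]

theorem pvAlt_iff (event : String) (subs : List String) :
    event_matches_py_alt event subs = true ↔ ∃ p ∈ subs, pvMatch event p := by
  unfold event_matches_py_alt
  simp only [Bool.not_eq_eq_eq_not, Bool.not_true, ← Bool.not_eq_true,
    PySem.Set.isdisjoint_iff]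
  push Not
  constructor
  · rintro ⟨x, hx, hxs⟩
    exact ⟨x, hxs, (pv_mem_cands event x).mp hx⟩
  · rintro ⟨p, hps, hm⟩
    exact ⟨p, (pv_mem_cands event p).mpr hm, hps⟩

-- ===== VERDICT (by name: the statement is the Claim_ definition above) =====
theorem event_matches_py_spec : Claim_equal_event_matches_py := by
  intro event subs _
  unfold Spec_event_matches_py event_matches_py
  rw [Bool.eq_iff_iff, pvGoA_iff, pvAlt_iff]
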